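-- pv_equiv track=rewrite | github.com/vladn90/Algorithms | Bit_Manipulation/total_hamming_distance.py | diff_bits_sum
-- ===== SOURCE A (Python) =====
-- def diff_bits_sum(array):
--     """ Bit manipulation improved algorithm.
--     Time complexity: O(n). Space complexity: O(1), n is len(array).
--     """
--     m = 1000000007
--     total = 0
--     n = len(array)
--     for i in range(32):
--         mask = 1 << i  # mask for ith bit
--         set_bits = 0  # count of set bits
--         for num in array:
--             if num & mask != 0:
--                 set_bits += 1
--         total = (total + ((set_bits * (n - set_bits) * 2) % m)) % m
--     return total
-- ===== SOURCE B (Python) =====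
-- def diff_bits_sum(array):
--     """Direct pairwise sum: add popcount((a ^ b) & 0xFFFFFFFF) over all
--     ordered pairs (counts each unordered pair twice, like A's *2), mod 1e9+7."""
--     m = 1000000007
--     total = 0
--     for a in array:
--         for b in array:
--             total += ((a ^ b) & 0xFFFFFFFF).bit_count()
--     return total % m
-- ===== Notes on version B (the rewrite author's own statement) =====
-- stated objective: alternative
-- what changed: Replaces the per-bit outer loop (32 passes counting set bits and combining counts) with a direct double loop over ordered pairs that accumulates the popcount of the 32-bit-masked XOR of each pair, taking the modulus once at the end.
import Mathlib
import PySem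

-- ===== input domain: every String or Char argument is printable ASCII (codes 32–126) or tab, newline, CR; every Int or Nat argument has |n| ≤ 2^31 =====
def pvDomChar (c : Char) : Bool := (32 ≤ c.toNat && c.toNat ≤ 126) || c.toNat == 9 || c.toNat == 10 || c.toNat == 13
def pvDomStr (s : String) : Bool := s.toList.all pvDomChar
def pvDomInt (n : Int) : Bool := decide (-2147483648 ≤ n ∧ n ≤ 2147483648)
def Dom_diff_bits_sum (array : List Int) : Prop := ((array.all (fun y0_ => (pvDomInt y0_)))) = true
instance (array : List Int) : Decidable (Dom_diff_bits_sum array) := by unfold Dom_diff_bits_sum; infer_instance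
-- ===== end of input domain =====

-- B replaces A's 32-pass per-bit counting with a direct double loop over ordered pairs
-- summing the popcount of the 32-bit-masked XOR (alternative decomposition, not claimed faster).

-- ===== PORT A =====
def diff_bits_sum (array : List Int) : Int :=
  let m : Int := 1000000007
  let n : Int := PySem.List.len array
  (PySem.List.pyRange 0 32 1).foldl (fun total i =>
    let mask : Int := (1 : Int) <<< i.toNat   -- 1 << i; exact: i ∈ range(32) is nonnegative
    let set_bits : Int := array.foldl (fun set_bits num =>
      if PySem.Int.band num mask ≠ 0 then set_bits + 1 else set_bits) 0
    PySem.Int.mod (total + PySem.Int.mod (set_bits * (n - set_bits) * 2) m) m) 0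

-- ===== PORT B =====
def diff_bits_sum_alt (array : List Int) : Int :=
  let m : Int := 1000000007
  let total : Int := array.foldl (fun total a =>
    array.foldl (fun total b =>
      total + (PySem.Int.bitCount (PySem.Int.band (PySem.Int.bxor a b) 4294967295) : Int)) total) 0
  PySem.Int.mod total m

-- ===== PRECONDITION & SPEC =====
def Spec_diff_bits_sum (array : List Int) (out : Int) : Prop := out = diff_bits_sum_alt array
instance (array : List Int) (out : Int) : Decidable (Spec_diff_bits_sum array out) := by unfold Spec_diff_bits_sum; infer_instance

-- ===== CLAIM (what is proved, stated in full; the proofs are below) =====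
def Claim_equal_diff_bits_sum : Prop := ∀ (array : List Int), Dom_diff_bits_sum array → Spec_diff_bits_sum array (diff_bits_sum array)

-- ===== LEMMAS AND PROOFS =====

theorem pv_land_add_ldiff (m : ℕ) : ∀ n : ℕ, (m &&& n) + Nat.ldiff m n = m := by
  induction m using Nat.binaryRec with
  | zero => intro n; simp [Nat.zero_and, Nat.ldiff, Nat.bitwise_zero_left]
  | bit a m ih =>
    intro n
    rw [← n.bit_testBit_zero_shiftRight_one, Nat.land_bit, Nat.ldiff_bit,
        Nat.bit_val, Nat.bit_val, Nat.bit_val]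
    have := ih (n >>> 1)
    cases a <;> cases hn : n.testBit 0 <;> simp <;> omega

theorem pv_ldiff_eq_sub (m n : ℕ) : Nat.ldiff m n = m - (m &&& n) := by
  have h := pv_land_add_ldiff m n; omega

theorem pv_ldiff_le (m n : ℕ) : Nat.ldiff m n ≤ m := by
  have h := pv_land_add_ldiff m n; omega

-- PySem's arithmetic encodings agree with Mathlib's structural Int bitwise operations
theorem pv_band_eq_land (a b : Int) : PySem.Int.band a b = Int.land a b := by
  rcases a with m | m <;> rcases b with n | n <;>
    simp [PySem.Int.band, Int.land, Int.negSucc_eq] <;> try omega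
  · rw [if_neg (by omega), pv_ldiff_eq_sub]
  · rw [if_neg (by omega), pv_ldiff_eq_sub]

theorem pv_bxor_eq_lxor (a b : Int) : PySem.Int.bxor a b = Int.xor a b := by
  rcases a with m | m <;> rcases b with n | n <;>
    simp [PySem.Int.bxor, Int.xor, Int.negSucc_eq] <;> try omega

theorem pv_testBit_natCast (n : ℕ) (i : ℕ) : Int.testBit (↑n) i = n.testBit i := rfl

theorem pv_land_natCast_nonneg (x : Int) (n : ℕ) : 0 ≤ Int.land x ↑n := by
  rcases x with m | m <;> simp [Int.land]

theorem pv_M_eq : (4294967295 : Int) = ((2 ^ 32 - 1 : ℕ) : Int) := by norm_num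

-- bits of the 32-bit-masked value
theorem pv_mask_toNat_testBit (x : Int) (i : ℕ) :
    ((Int.land x 4294967295).toNat).testBit i = (x.testBit i && decide (i < 32)) := by
  have h0 : 0 ≤ Int.land x 4294967295 := by rw [pv_M_eq]; exact pv_land_natCast_nonneg _ _
  have h1 : ((Int.land x 4294967295).toNat : Int) = Int.land x 4294967295 := Int.toNat_of_nonneg h0
  have h2 : Int.testBit ((Int.land x 4294967295).toNat : Int) i
      = ((Int.land x 4294967295).toNat).testBit i := rfl
  rw [← h2, h1, pv_M_eq]
  rw [Int.testBit_land, pv_testBit_natCast, Nat.testBit_two_pow_sub_one]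

theorem pv_mask_lt (x : Int) : (Int.land x 4294967295).toNat < 2 ^ 32 := by
  rcases x with m | m <;> simp [Int.land]
  · have := Nat.and_le_right (n := m) (m := 4294967295); omega
  · have := pv_ldiff_le 4294967295 m; omega

-- popcount as a sum of bits
theorem pv_pc_sum : ∀ (k v : ℕ), v < 2 ^ k →
    PySem.Int.bitCount (↑v) = ((List.range k).map (fun i => (v.testBit i).toNat)).sum := by
  intro k
  induction k with
  | zero => intro v hv; interval_cases v; simp [PySem.Int.bitCount_zero]
  | succ k ih =>
    intro v hv
    by_cases h0 : v = 0
    · subst h0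
      simp [PySem.Int.bitCount_zero, Nat.zero_testBit]
    · rw [PySem.Int.bitCount_natCast (Nat.pos_of_ne_zero h0)]
      rw [List.range_succ_eq_map]
      simp only [List.map_cons, List.map_map, List.sum_cons]
      rw [ih (v / 2) (by omega)]
      have hb : (v.testBit 0).toNat = v % 2 := by
        rw [Nat.testBit_zero]; rcases Nat.mod_two_eq_zero_or_one v with h | h <;> simp [h]
      have hs : ∀ i, ((v / 2).testBit i) = v.testBit (i + 1) := by
        intro i; rw [← Nat.testBit_succ]
      simp only [Function.comp_def, hs, hb]

-- A's bit test:  num & (1 << k) != 0  ↔  testBit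
theorem pv_band_mask_ne (num : Int) (k : ℕ) (mask : Int) (hmask : mask = ((2 ^ k : ℕ) : Int)) :
    (PySem.Int.band num mask ≠ 0) ↔ num.testBit k = true := by
  rw [pv_band_eq_land, hmask]
  have h0 : 0 ≤ Int.land num ((2 ^ k : ℕ) : Int) := pv_land_natCast_nonneg _ _
  have h1 : ((Int.land num ((2 ^ k : ℕ) : Int)).toNat : Int) = Int.land num ((2 ^ k : ℕ) : Int) :=
    Int.toNat_of_nonneg h0
  have hbit : ∀ j, ((Int.land num ((2 ^ k : ℕ) : Int)).toNat).testBit j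
      = (num.testBit j && decide (k = j)) := by
    intro j
    have h2 : Int.testBit ((Int.land num ((2 ^ k : ℕ) : Int)).toNat : Int) j
        = ((Int.land num ((2 ^ k : ℕ) : Int)).toNat).testBit j := rfl
    rw [← h2, h1, Int.testBit_land]
    congr 1
    exact Nat.testBit_two_pow
  constructor
  · intro hne
    by_contra hbk
    have hz : (Int.land num ((2 ^ k : ℕ) : Int)).toNat = 0 := by
      apply Nat.zero_of_testBit_eq_false
      intro j
      rw [hbit j]
      by_cases hkj : k = j
      · subst hkj; simp_all
      · simp [hkj]
    rw [hz] at h1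
    exact hne (by exact_mod_cast h1.symm)
  · intro hbk hz
    have hb := hbit k
    have hz' : (Int.land num ((2 ^ k : ℕ) : Int)).toNat = 0 := by rw [hz]; rfl
    rw [hz'] at hb
    simp [hbk, Nat.zero_testBit] at hb

-- A's inner counting loop
theorem pv_count_fold (k : ℕ) (mask : Int) (hmask : mask = ((2 ^ k : ℕ) : Int)) (xs : List Int) :
    ∀ a : Int,
    xs.foldl (fun sb num => if PySem.Int.band num mask ≠ 0 then sb + 1 else sb) a
      = a + ↑(xs.countP (fun x => x.testBit k)) := by
  induction xs with
  | nil => intro a; simp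
  | cons x t ih =>
    intro a
    simp only [List.foldl_cons, List.countP_cons]
    by_cases hx : x.testBit k
    · rw [if_pos ((pv_band_mask_ne x k mask hmask).mpr hx), ih]
      simp [hx]; ring
    · have hne : ¬ (PySem.Int.band x mask ≠ 0) := by
        intro hc; exact hx ((pv_band_mask_ne x k mask hmask).mp hc)
      rw [if_neg hne, ih]
      simp [hx]

-- stepwise-mod fold = mod of the sum
theorem pv_modfold (f : ℕ → Int) : ∀ (l : List ℕ) (a : Int),
    l.foldl (fun t k => PySem.Int.mod (t + PySem.Int.mod (f k) 1000000007) 1000000007)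
        (PySem.Int.mod a 1000000007)
      = PySem.Int.mod (a + (l.map f).sum) 1000000007 := by
  intro l
  induction l with
  | nil => intro a; simp
  | cons x t ih =>
    intro a
    simp only [List.foldl_cons, List.map_cons, List.sum_cons]
    have hstep : PySem.Int.mod (PySem.Int.mod a 1000000007 + PySem.Int.mod (f x) 1000000007) 1000000007
        = PySem.Int.mod (a + f x) 1000000007 := by
      rw [PySem.Int.mod_eq_emod_of_pos (by norm_num), PySem.Int.mod_eq_emod_of_pos (by norm_num),
          PySem.Int.mod_eq_emod_of_pos (by norm_num), PySem.Int.mod_eq_emod_of_pos (by norm_num),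
          Int.add_emod a (f x)]
    rw [hstep, ih (a + f x)]
    ring_nf

-- the pairwise popcount is a per-bit 0/1 sum
theorem pv_pair_eq (a b : Int) :
    (PySem.Int.bitCount (PySem.Int.band (PySem.Int.bxor a b) 4294967295) : Int)
      = ((List.range 32).map (fun i => if xor (a.testBit i) (b.testBit i) then (1 : Int) else 0)).sum := by
  rw [pv_bxor_eq_lxor, pv_band_eq_land]
  set z := Int.xor a b with hz
  have h0 : 0 ≤ Int.land z 4294967295 := by rw [pv_M_eq]; exact pv_land_natCast_nonneg _ _
  have h1 : Int.land z 4294967295 = ((Int.land z 4294967295).toNat : Int) :=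
    (Int.toNat_of_nonneg h0).symm
  rw [h1, pv_pc_sum 32 _ (pv_mask_lt z)]
  rw [Nat.cast_list_sum, List.map_map]
  apply congrArg
  apply List.map_congr_left
  intro i hi
  have hi32 : i < 32 := List.mem_range.mp hi
  simp only [Function.comp_def]
  rw [pv_mask_toNat_testBit z i]
  have hxor : z.testBit i = xor (a.testBit i) (b.testBit i) := Int.testBit_lxor a b i
  rw [hxor]
  cases hab : xor (a.testBit i) (b.testBit i) <;> simp [hi32]

theorem pv_sum_map_comm {α β : Type} (l1 : List α) (l2 : List β) (g : α → β → Int) :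
    (l1.map (fun a => (l2.map (fun b => g a b)).sum)).sum
      = (l2.map (fun b => (l1.map (fun a => g a b)).sum)).sum := by
  induction l1 with
  | nil => simp
  | cons x t ih =>
    simp only [List.map_cons, List.sum_cons, ih, ← PySem.List.sum_map_add_int]

theorem pv_outer_count (p : Int → Bool) (xs : List Int) :
    (xs.map (fun a => (xs.map (fun b => if xor (p a) (p b) then (1 : Int) else 0)).sum)).sum
      = 2 * (↑(xs.countP p) : Int) * ↑(xs.countP (fun x => !p x)) := by
  have hinner : ∀ a, (xs.map (fun b => if xor (p a) (p b) then (1 : Int) else 0)).sum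
      = if p a then (↑(xs.countP (fun x => !p x)) : Int) else ↑(xs.countP p) := by
    intro a
    cases hpa : p a
    · rw [if_neg (by simp)]
      rw [← PySem.List.sum_map_ite_one_zero p xs]
      congr 1
      apply List.map_congr_left
      intro b _
      simp
    · rw [if_pos rfl]
      rw [← PySem.List.sum_map_ite_one_zero (fun x => !p x) xs]
      congr 1
      apply List.map_congr_left
      intro b _
      simp
  calc (xs.map (fun a => (xs.map (fun b => if xor (p a) (p b) then (1 : Int) else 0)).sum)).sum
      = (xs.map (fun a => if p a then (↑(xs.countP (fun x => !p x)) : Int) else ↑(xs.countP p))).sum := by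
        apply congrArg
        apply List.map_congr_left
        intro a _
        exact hinner a
    _ = (xs.map (fun a => (↑(xs.countP (fun x => !p x)) : Int) * (if p a then (1:Int) else 0)
            + (↑(xs.countP p) : Int) * (if !p a then (1:Int) else 0))).sum := by
        apply congrArg
        apply List.map_congr_left
        intro a _
        cases hpa : p a <;> simp
    _ = 2 * (↑(xs.countP p) : Int) * ↑(xs.countP (fun x => !p x)) := by
        rw [PySem.List.sum_map_add_int, List.sum_map_mul_left, List.sum_map_mul_left,
            PySem.List.sum_map_ite_one_zero, PySem.List.sum_map_ite_one_zero]
        ring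

theorem pv_A_eq (xs : List Int) : diff_bits_sum xs
    = PySem.Int.mod (((List.range 32).map (fun k =>
        (↑(xs.countP (fun x => x.testBit k)) : Int)
          * ((↑xs.length : Int) - ↑(xs.countP (fun x => x.testBit k))) * 2)).sum) 1000000007 := by
  simp only [diff_bits_sum]
  rw [PySem.List.pyRange_one, List.foldl_map]
  have h32 : ((32 : Int) - 0).toNat = 32 := rfl
  rw [h32]
  refine (PySem.List.foldl_congr_mem _ _
      (fun (t : Int) (k : ℕ) => PySem.Int.mod (t + PySem.Int.mod
        ((↑(xs.countP (fun x => x.testBit k)) : Int)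
          * ((↑xs.length : Int) - ↑(xs.countP (fun x => x.testBit k))) * 2) 1000000007) 1000000007)
      _ ?_).trans ?_
  · intro acc k _
    have htn : ((0 : Int) + (k : Int)).toNat = k := by omega
    simp only [htn, PySem.List.len_eq]
    rw [pv_count_fold k _ (by rw [Int.one_shiftLeft]) xs 0]
    norm_num
  · have h0 : (0 : Int) = PySem.Int.mod 0 1000000007 := by
      rw [PySem.Int.mod_eq_emod_of_pos (by norm_num)]; rfl
    rw [h0, pv_modfold (fun k => (↑(xs.countP (fun x => x.testBit k)) : Int)
        * ((↑xs.length : Int) - ↑(xs.countP (fun x => x.testBit k))) * 2) (List.range 32) 0]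
    norm_num

theorem pv_B_eq (xs : List Int) : diff_bits_sum_alt xs
    = PySem.Int.mod ((xs.map (fun a => (xs.map (fun b =>
        (PySem.Int.bitCount (PySem.Int.band (PySem.Int.bxor a b) 4294967295) : Int))).sum)).sum) 1000000007 := by
  simp only [diff_bits_sum_alt]
  congr 1
  have hbody : (fun (total : Int) (a : Int) =>
      xs.foldl (fun total b =>
        total + (PySem.Int.bitCount (PySem.Int.band (PySem.Int.bxor a b) 4294967295) : Int)) total)
      = (fun (total : Int) (a : Int) => total + (xs.map (fun b =>
        (PySem.Int.bitCount (PySem.Int.band (PySem.Int.bxor a b) 4294967295) : Int))).sum) := by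
    funext total a
    rw [PySem.List.foldl_add]
  rw [hbody, PySem.List.foldl_add]
  simp

-- the two raw sums coincide (exchange the order of summation, then count per bit)
theorem pv_sums_eq (xs : List Int) :
    (xs.map (fun a => (xs.map (fun b =>
        (PySem.Int.bitCount (PySem.Int.band (PySem.Int.bxor a b) 4294967295) : Int))).sum)).sum
      = ((List.range 32).map (fun k =>
        (↑(xs.countP (fun x => x.testBit k)) : Int)
          * ((↑xs.length : Int) - ↑(xs.countP (fun x => x.testBit k))) * 2)).sum := by
  calc (xs.map (fun a => (xs.map (fun b =>
        (PySem.Int.bitCount (PySem.Int.band (PySem.Int.bxor a b) 4294967295) : Int))).sum)).sum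
      = (xs.map (fun a => ((List.range 32).map (fun i =>
          (xs.map (fun b => if xor (a.testBit i) (b.testBit i) then (1:Int) else 0)).sum)).sum)).sum := by
        apply congrArg; apply List.map_congr_left; intro a _
        rw [show (xs.map (fun b =>
            (PySem.Int.bitCount (PySem.Int.band (PySem.Int.bxor a b) 4294967295) : Int)))
          = (xs.map (fun b => ((List.range 32).map (fun i =>
              if xor (a.testBit i) (b.testBit i) then (1:Int) else 0)).sum)) from
          List.map_congr_left (fun b _ => pv_pair_eq a b)]
        exact pv_sum_map_comm xs (List.range 32) _
    _ = ((List.range 32).map (fun i =>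
          (xs.map (fun a => (xs.map (fun b =>
            if xor (a.testBit i) (b.testBit i) then (1:Int) else 0)).sum)).sum)).sum :=
        pv_sum_map_comm xs (List.range 32) _
    _ = ((List.range 32).map (fun k =>
        (↑(xs.countP (fun x => x.testBit k)) : Int)
          * ((↑xs.length : Int) - ↑(xs.countP (fun x => x.testBit k))) * 2)).sum := by
        apply congrArg; apply List.map_congr_left; intro k _
        rw [pv_outer_count (fun x => x.testBit k) xs]
        have hlen := List.length_eq_countP_add_countP (fun x => x.testBit k) (l := xs)
        have hnp : (List.countP (fun a => decide ¬(fun x => x.testBit k) a = true) xs)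
            = List.countP (fun x => !x.testBit k) xs := by
          apply List.countP_congr
          intro x _
          cases h : x.testBit k <;> simp [h]
        rw [hnp] at hlen
        have hc : (↑xs.length : Int) = ↑(xs.countP (fun x => x.testBit k))
            + ↑(xs.countP (fun x => !x.testBit k)) := by exact_mod_cast congrArg Nat.cast hlen
        rw [hc]
        ring

-- ===== VERDICT (by name: the statement is the Claim_ definition above) =====
theorem diff_bits_sum_spec : Claim_equal_diff_bits_sum := by
  intro xs _
  show diff_bits_sum xs = diff_bits_sum_alt xs
  rw [pv_A_eq, pv_B_eq, pv_sums_eq]
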